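-- pv_equiv track=rewrite | github.com/rbbtulain/CP125-Class-Repo | labs/lab05/exercise3/exercise3.py | find_bottleneck_index
-- ===== SOURCE A (Python) =====
-- def find_bottleneck_index(traceroute):
--     """
--     Find the index of the hop where the largest latency jump begins.
--     """
--     if len(traceroute) < 2:
--         return -1
--     largest_jump = 0
--     bottleneck_index = -1
--     for i in range(1, len(traceroute)):
--         previous_latency = traceroute[i - 1][1]
--         current_latency = traceroute[i][1]
--         jump = current_latency - previous_latency
--         if jump > largest_jump:
--             largest_jump = jump
--             bottleneck_index = i - 1
--     return bottleneck_index
-- ===== SOURCE B (Python) =====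
-- def find_bottleneck_index(traceroute):
--     """Find the index of the hop where the largest latency jump begins."""
--     candidates = [(cur[1] - prev[1], i)
--                   for i, (prev, cur) in enumerate(zip(traceroute, traceroute[1:]))]
--     ranked = sorted(candidates, key=lambda c: c[0], reverse=True)
--     if ranked and ranked[0][0] > 0:
--         return ranked[0][1]
--     return -1
-- ===== Notes on version B (the rewrite author's own statement) =====
-- stated objective: alternative
-- what changed: Replaces A's single-pass running-maximum loop with a sort-based ranking: tag every consecutive latency difference with its index, stably sort the pairs by jump descending (stability keeps the earliest index first among equal jumps), and read the answer off the top-ranked pair.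
import Mathlib
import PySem

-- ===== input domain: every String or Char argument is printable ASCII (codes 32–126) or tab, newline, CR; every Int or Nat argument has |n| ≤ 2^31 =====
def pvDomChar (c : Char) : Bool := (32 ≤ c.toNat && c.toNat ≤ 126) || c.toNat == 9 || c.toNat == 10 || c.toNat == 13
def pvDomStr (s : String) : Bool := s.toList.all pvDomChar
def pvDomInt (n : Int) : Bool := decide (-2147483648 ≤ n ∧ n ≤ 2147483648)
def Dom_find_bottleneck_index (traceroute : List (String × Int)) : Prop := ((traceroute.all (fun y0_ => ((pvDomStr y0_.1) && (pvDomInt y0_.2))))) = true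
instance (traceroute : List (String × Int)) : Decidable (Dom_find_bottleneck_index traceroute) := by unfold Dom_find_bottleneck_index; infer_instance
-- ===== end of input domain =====

-- B ranks every (jump, index) candidate by a stable descending sort on the jump and reads the
-- answer off the top pair (alternative sort-based strategy; O(n log n) vs A's O(n)).

-- ===== PORT A =====
-- literal transliteration of A's running-maximum loop over range(1, len(traceroute))
def find_bottleneck_index (traceroute : List (String × Int)) : Int :=
  if traceroute.length < 2 then -1
  else
    ((PySem.List.pyRange 1 (traceroute.length : Int) 1).foldl
      (fun (st : Int × Int) i =>
        let previous_latency := (PySem.List.pyGetD traceroute (i - 1) ("", 0)).2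
        let current_latency := (PySem.List.pyGetD traceroute i ("", 0)).2
        let jump := current_latency - previous_latency
        if jump > st.1 then (jump, i - 1) else st)
      ((0 : Int), (-1 : Int))).2

-- ===== PORT B =====
-- the comprehension '[(cur[1]-prev[1], i) for i, (prev, cur) in enumerate(zip(tr, tr[1:]))]'
def pyCandidates (traceroute : List (String × Int)) : List (Int × Int) :=
  (PySem.List.enumerate (traceroute.zip (PySem.List.slice traceroute (some 1) none))).map
    (fun p => (p.2.2.2 - p.2.1.2, p.1))

-- 'sorted(candidates, key=lambda c: c[0], reverse=True)' then the guarded head lookup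
def find_bottleneck_index_alt (traceroute : List (String × Int)) : Int :=
  let ranked := PySem.List.sorted (pyCandidates traceroute) (fun c => c.1) true
  match ranked with
  | [] => -1
  | c :: _ => if c.1 > 0 then c.2 else -1

-- ===== PRECONDITION & SPEC =====
def Spec_find_bottleneck_index (traceroute : List (String × Int)) (out : Int) : Prop := out = find_bottleneck_index_alt traceroute
instance (traceroute : List (String × Int)) (out : Int) : Decidable (Spec_find_bottleneck_index traceroute out) := by unfold Spec_find_bottleneck_index; infer_instance

-- ===== CLAIM (what is proved, stated in full; the proofs are below) =====
def Claim_equal_find_bottleneck_index : Prop := ∀ (traceroute : List (String × Int)), Dom_find_bottleneck_index traceroute → Spec_find_bottleneck_index traceroute (find_bottleneck_index traceroute)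

-- ===== LEMMAS AND PROOFS =====

-- the bare jump list (proof-side view of the candidates' first components)
def jumpsOf (traceroute : List (String × Int)) : List Int :=
  (traceroute.zip (PySem.List.slice traceroute (some 1) none)).map (fun p => p.2.2 - p.1.2)

-- jumps paired with their indices, starting at off
def pairUp : List Int → Int → List (Int × Int)
  | [], _ => []
  | j :: t, off => (j, off) :: pairUp t (off + 1)

-- structural recursion equivalent to A's loop, with explicit jump list and index offset
def loopA : List Int → Int → Int × Int → Int × Int
  | [], _, st => st
  | j :: t, off, st => loopA t (off + 1) (if j > st.1 then (j, off) else st)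

lemma jumpsOf_single (a : String × Int) : jumpsOf [a] = [] := rfl

lemma jumpsOf_cons_cons (a b : String × Int) (t : List (String × Int)) :
    jumpsOf (a :: b :: t) = (b.2 - a.2) :: jumpsOf (b :: t) := by
  simp [jumpsOf, PySem.List.slice]

lemma jumpsOf_length (tr : List (String × Int)) : (jumpsOf tr).length = tr.length - 1 := by
  induction tr with
  | nil => rfl
  | cons a t ih =>
    cases t with
    | nil => rfl
    | cons b t' => simp [jumpsOf_cons_cons] at *; omega

lemma jumpsOf_append (ys : List (String × Int)) (x : String × Int) (h : ys ≠ []) :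
    jumpsOf (ys ++ [x]) = jumpsOf ys ++ [x.2 - (ys.getLast h).2] := by
  induction ys with
  | nil => exact absurd rfl h
  | cons a t ih =>
    cases t with
    | nil => simp [jumpsOf_cons_cons, jumpsOf_single]
    | cons b t' =>
      have := ih (by simp)
      simp only [List.cons_append, jumpsOf_cons_cons] at *
      simp [this, List.getLast_cons]

lemma loopA_append (js : List Int) (j : Int) (off : Int) (st : Int × Int) :
    loopA (js ++ [j]) off st =
      (let st' := loopA js off st
       if j > st'.1 then (j, off + js.length) else st') := by
  induction js generalizing off st with
  | nil => simp [loopA]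
  | cons a t ih =>
    simp only [List.cons_append, loopA, ih]
    have : off + 1 + (t.length : Int) = off + ((a :: t).length : Int) := by
      simp; omega
    simp [this]

-- A's pyRange fold equals loopA on the jump list
lemma A_eq_loopA (tr : List (String × Int)) (h : 2 ≤ tr.length) :
    (PySem.List.pyRange 1 (tr.length : Int) 1).foldl
      (fun (st : Int × Int) i =>
        let previous_latency := (PySem.List.pyGetD tr (i - 1) ("", 0)).2
        let current_latency := (PySem.List.pyGetD tr i ("", 0)).2
        let jump := current_latency - previous_latency
        if jump > st.1 then (jump, i - 1) else st)
      ((0 : Int), (-1 : Int)) = loopA (jumpsOf tr) 0 (0, -1) := by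
  induction tr using List.reverseRecOn with
  | nil => simp at h
  | append_singleton ys x ih =>
    by_cases hy : 2 ≤ ys.length
    · have hy1 : ys ≠ [] := by intro e; simp [e] at hy
      have hlen : ((ys ++ [x]).length : Int) = (ys.length : Int) + 1 := by simp
      rw [hlen, PySem.List.pyRange_one_succ_right (by exact_mod_cast Nat.one_le_iff_ne_zero.mpr (by omega))]
      rw [List.foldl_append]
      have hcongr :
          (PySem.List.pyRange 1 (ys.length : Int) 1).foldl
            (fun (st : Int × Int) i =>
              let previous_latency := (PySem.List.pyGetD (ys ++ [x]) (i - 1) ("", 0)).2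
              let current_latency := (PySem.List.pyGetD (ys ++ [x]) i ("", 0)).2
              let jump := current_latency - previous_latency
              if jump > st.1 then (jump, i - 1) else st)
            ((0 : Int), (-1 : Int)) =
          (PySem.List.pyRange 1 (ys.length : Int) 1).foldl
            (fun (st : Int × Int) i =>
              let previous_latency := (PySem.List.pyGetD ys (i - 1) ("", 0)).2
              let current_latency := (PySem.List.pyGetD ys i ("", 0)).2
              let jump := current_latency - previous_latency
              if jump > st.1 then (jump, i - 1) else st)
            ((0 : Int), (-1 : Int)) := by
        apply PySem.List.foldl_congr_mem
        intro st i hi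
        have hb := (PySem.List.mem_pyRange_one.mp hi)
        have e1 : PySem.List.pyGetD (ys ++ [x]) (i - 1) ("", 0) = PySem.List.pyGetD ys (i - 1) ("", 0) := by
          rw [PySem.List.pyGetD_eq_getElem (i := i - 1) (ys ++ [x]) ("", 0) (by omega) (by push_cast [List.length_append]; omega),
              PySem.List.pyGetD_eq_getElem (i := i - 1) ys ("", 0) (by omega) (by exact_mod_cast (by omega : i - 1 < (ys.length : Int)))]
          exact List.getElem_append_left (by omega)
        have e2 : PySem.List.pyGetD (ys ++ [x]) i ("", 0) = PySem.List.pyGetD ys i ("", 0) := by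
          rw [PySem.List.pyGetD_eq_getElem (i := i) (ys ++ [x]) ("", 0) (by omega) (by push_cast [List.length_append]; omega),
              PySem.List.pyGetD_eq_getElem (i := i) ys ("", 0) (by omega) (by exact_mod_cast hb.2)]
          exact List.getElem_append_left (by omega)
        simp only [e1, e2]
      rw [hcongr, List.foldl_cons, List.foldl_nil, ih hy]
      have elast : PySem.List.pyGetD (ys ++ [x]) ((ys.length : Int)) ("", 0) = x := by
        rw [PySem.List.pyGetD_eq_getElem (i := (ys.length : Int)) (ys ++ [x]) ("", 0) (by omega) (by simp)]
        simp
      have eprev : PySem.List.pyGetD (ys ++ [x]) ((ys.length : Int) - 1) ("", 0) = ys.getLast hy1 := by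
        rw [PySem.List.pyGetD_eq_getElem (i := (ys.length : Int) - 1) (ys ++ [x]) ("", 0) (by omega) (by push_cast [List.length_append]; omega)]
        have hts : ((ys.length : Int) - 1).toNat = ys.length - 1 := by omega
        simp only [hts]
        rw [List.getElem_append_left (by omega : ys.length - 1 < ys.length), List.getLast_eq_getElem]
      rw [jumpsOf_append ys x hy1, loopA_append]
      simp only [elast, eprev, jumpsOf_length]
      have : (0 : Int) + ((ys.length - 1 : Nat) : Int) = (ys.length : Int) - 1 := by omega
      simp [this]
    · -- ys has exactly one element
      have h1 : ys.length = 1 := by simp at h; omega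
      obtain ⟨a, rfl⟩ : ∃ a, ys = [a] := by
        cases ys with
        | nil => simp at h1
        | cons a t => cases t with
          | nil => exact ⟨a, rfl⟩
          | cons b t' => simp at h1
      show (PySem.List.pyRange 1 2 1).foldl _ _ = _
      rw [show (PySem.List.pyRange 1 2 1) = [1] from rfl]
      simp [loopA, jumpsOf_cons_cons, jumpsOf_single, PySem.List.pyGetD, PySem.List.pyGet?, PySem.List.pyIdx?]

-- characterization of loopA in terms of the running max (foldl max) and first index
lemma loopA_char (t : List Int) (j lj bi off : Int) :
    (loopA (j :: t) off (lj, bi)).2 =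
      if lj < t.foldl max j then
        off + (((PySem.List.index? (j :: t) (t.foldl max j)).getD 0 : Nat) : Int)
      else bi := by
  induction t generalizing j lj bi off with
  | nil =>
    simp only [List.foldl_nil, loopA]
    by_cases hlt : lj < j
    · simp [hlt]
    · simp [hlt]
  | cons x t' ih =>
    have hM' : ∀ v : Int, List.foldl max (max v x) t' = max v (List.foldl max x t') := by
      intro v; exact List.foldl_assoc
    have hmem : List.foldl max x t' ∈ x :: t' := by
      have := PySem.List.max?_id_cons x t'
      exact PySem.List.max?_mem this
    obtain ⟨k, hk⟩ : ∃ k, PySem.List.index? (x :: t') (List.foldl max x t') = some k :=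
      Option.isSome_iff_exists.mp ((PySem.List.index?_isSome_iff _ _).mpr hmem)
    have hMle : x ≤ List.foldl max x t' := (PySem.List.le_foldl_max t' x).1
    show (loopA (x :: t') (off + 1) (if j > lj then (j, off) else (lj, bi))).2 = _
    simp only [List.foldl_cons, hM']
    by_cases hlt : lj < j
    · simp only [if_pos (by omega : j > lj)]
      rw [ih x j off (off + 1)]
      by_cases h2 : j < List.foldl max x t'
      · have hMj : max j (List.foldl max x t') = List.foldl max x t' := by omega
        have hne : j ≠ List.foldl max x t' := by omega
        rw [hMj, if_pos (by omega), if_pos (by omega),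
            PySem.List.index?_cons_of_ne _ hne, hk]
        simp; omega
      · have hMj : max j (List.foldl max x t') = j := by omega
        rw [hMj, if_neg (by omega), if_pos hlt, PySem.List.index?_cons_self]
        simp
    · simp only [if_neg (by omega : ¬ j > lj)]
      rw [ih x lj bi (off + 1)]
      by_cases h2 : lj < List.foldl max x t'
      · have hMj : max j (List.foldl max x t') = List.foldl max x t' := by omega
        have hne : j ≠ List.foldl max x t' := by omega
        rw [hMj, if_pos h2, if_pos h2, PySem.List.index?_cons_of_ne _ hne, hk]
        simp; omega
      · have : ¬ lj < max j (List.foldl max x t') := by omega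
        rw [if_neg h2, if_neg this]

-- pairUp of a mapped list is the mapped enumerate (connects pyCandidates with jumpsOf)
lemma pairUp_map_enumerate {α : Type} (f : α → Int) (Z : List α) (s : Int) :
    pairUp (Z.map f) s = (PySem.List.enumerate Z s).map (fun p => (f p.2, p.1)) := by
  induction Z generalizing s with
  | nil => rfl
  | cons z t ih => simp [pairUp, PySem.List.enumerate_cons, ih]

lemma pyCandidates_eq (tr : List (String × Int)) :
    pyCandidates tr = pairUp (jumpsOf tr) 0 := by
  unfold pyCandidates jumpsOf
  rw [pairUp_map_enumerate]

lemma pairUp_append (ys : List Int) (x : Int) (off : Int) :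
    pairUp (ys ++ [x]) off = pairUp ys off ++ [(x, off + ys.length)] := by
  induction ys generalizing off with
  | nil => simp [pairUp]
  | cons a t ih =>
    simp only [List.cons_append, pairUp, ih]
    have : off + 1 + (t.length : Int) = off + ((a :: t).length : Int) := by simp; omega
    simp [this]

-- head of the stable reverse sort after appending one element
lemma sortedRev_head_append (xs : List (Int × Int)) (x : Int × Int) :
    (PySem.List.sorted (xs ++ [x]) (fun c => c.1) true).head? =
      match (PySem.List.sorted xs (fun c => c.1) true).head? with
      | none => some x
      | some h => some (if h.1 < x.1 then x else h) := by
  rw [PySem.List.sorted_rev_eq_foldl_insertBy, List.foldl_append,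
      ← PySem.List.sorted_rev_eq_foldl_insertBy]
  cases hs : PySem.List.sorted xs (fun c => c.1) true with
  | nil => simp [PySem.List.insertBy]
  | cons h t =>
    by_cases hx : h.1 < x.1
    · simp [List.foldl_cons, PySem.List.insertBy, hx]
    · simp [List.foldl_cons, PySem.List.insertBy, hx]

-- head of the reverse-sorted candidate list: the running max paired with its first index
lemma head_sorted_pairUp (j : Int) (t : List Int) (off : Int) :
    (PySem.List.sorted (pairUp (j :: t) off) (fun c => c.1) true).head? =
      some (t.foldl max j,
        off + (((PySem.List.index? (j :: t) (t.foldl max j)).getD 0 : Nat) : Int)) := by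
  induction t using List.reverseRecOn generalizing j off with
  | nil =>
    show (PySem.List.sorted [(j, off)] (fun c => c.1) true).head? = _
    simp only [List.foldl_nil]
    rw [PySem.List.index?_cons_self]
    simp [PySem.List.sorted, PySem.List.insertBy]
  | append_singleton t' x ih =>
    have hjle : j ≤ t'.foldl max j := (PySem.List.le_foldl_max t' j).1
    have htle : ∀ y ∈ t', y ≤ t'.foldl max j := (PySem.List.le_foldl_max t' j).2
    have hcons : j :: (t' ++ [x]) = (j :: t') ++ [x] := (List.cons_append ..).symm
    have hfoldl : (t' ++ [x]).foldl max j = max (t'.foldl max j) x := by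
      rw [List.foldl_append]; rfl
    rw [hcons, pairUp_append, sortedRev_head_append, ih, hfoldl]
    by_cases hlt : t'.foldl max j < x
    · have hmax : max (t'.foldl max j) x = x := by omega
      have hnotmem : x ∉ j :: t' := by
        intro hmem
        rcases List.mem_cons.mp hmem with h1 | h1
        · omega
        · have := htle x h1; omega
      rw [hmax, PySem.List.index?_append_singleton_self (j :: t') x hnotmem]
      simp [hlt]
    · have hmax : max (t'.foldl max j) x = t'.foldl max j := by omega
      have hmem : t'.foldl max j ∈ j :: t' := by
        rcases PySem.List.foldl_max_mem t' j with h1 | h1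
        · rw [h1]; exact List.mem_cons_self
        · exact List.mem_cons_of_mem _ h1
      rw [hmax, PySem.List.index?_append_of_mem [x] hmem]
      simp [hlt]

-- ===== VERDICT (by name: the statement is the Claim_ definition above) =====
theorem find_bottleneck_index_spec : Claim_equal_find_bottleneck_index := by
  intro tr _
  unfold Spec_find_bottleneck_index find_bottleneck_index find_bottleneck_index_alt
  by_cases h : tr.length < 2
  · obtain hnil | ⟨a, rfl⟩ : tr = [] ∨ ∃ a, tr = [a] := by
      cases tr with
      | nil => exact Or.inl rfl
      | cons a t => cases t with
        | nil => exact Or.inr ⟨a, rfl⟩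
        | cons b t' => simp at h
    · subst hnil; rfl
    · simp [pyCandidates, PySem.List.slice, PySem.List.sorted]
  · simp only [if_neg h]
    rw [A_eq_loopA tr (by omega)]
    have hlen : (jumpsOf tr).length = tr.length - 1 := jumpsOf_length tr
    obtain ⟨j, t, hjt⟩ : ∃ j t, jumpsOf tr = j :: t := by
      cases hj : jumpsOf tr with
      | nil => exfalso; rw [hj] at hlen; simp at hlen; omega
      | cons j t => exact ⟨j, t, rfl⟩
    have hcand : pyCandidates tr = pairUp (j :: t) 0 := by
      rw [pyCandidates_eq, hjt]
    rw [hjt, loopA_char, hcand]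
    have hhead := head_sorted_pairUp j t 0
    cases hs : PySem.List.sorted (pairUp (j :: t) 0) (fun c => c.1) true with
    | nil => rw [hs] at hhead; simp at hhead
    | cons c rest =>
      rw [hs] at hhead
      simp only [List.head?_cons, Option.some.injEq] at hhead
      rw [hhead]
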